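-- pv_equiv track=rewrite | github.com/thidorta/MC656-2025-s2 | backend/build_curriculum_phase2_tree.py | compute_depth_levels
-- ===== SOURCE A (Python) =====
-- from collections import deque
-- from typing import Any, Dict, List, Set
--
-- def compute_depth_levels(prereqs: Dict[str, List[str]], all_codes: Set[str]) -> Dict[str, int]:
--     """
--     Compute depth using BFS/topological layering.
--
--     depth = 0: courses with no prerequisites
--     depth = n: max(parent_depths) + 1
--     """
--     depths: Dict[str, int] = {}
--
--     # Find courses with no prerequisites (depth 0)
--     queue = deque()
--     for code in all_codes:
--         course_prereqs = prereqs.get(code, [])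
--         if not course_prereqs:
--             depths[code] = 0
--             queue.append(code)
--
--     # BFS to assign depths
--     while queue:
--         current = queue.popleft()
--         current_depth = depths[current]
--
--         # Find all courses that depend on current
--         for code in all_codes:
--             if code in depths:
--                 continue  # Already processed
--
--             course_prereqs = prereqs.get(code, [])
--             if current in course_prereqs:
--                 # Check if all prerequisites have been assigned depths
--                 all_prereqs_done = all(p in depths for p in course_prereqs)
--
--                 if all_prereqs_done:
--                     # Depth is max of parent depths + 1
--                     max_prereq_depth = max(depths[p] for p in course_prereqs)
--                     depths[code] = max_prereq_depth + 1
--                     queue.append(code)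
--
--     # Handle any remaining courses (cycles or disconnected)
--     for code in all_codes:
--         if code not in depths:
--             depths[code] = 0  # Default depth for orphans
--
--     return depths
-- ===== SOURCE B (Python) =====
-- def _depth_if_ready(course_prereqs, depths):
--     """One fused pass: None if some prerequisite has no depth yet, else 1 + max depth."""
--     m = -1
--     for p in course_prereqs:
--         dp = depths.get(p)
--         if dp is None:
--             return None
--         if dp > m:
--             m = dp
--     return m + 1
--
--
-- def compute_depth_levels(prereqs, all_codes):
--     """Reverse-adjacency index + an index-walked worklist: each processed course
--     visits only its actual dependents; readiness and the new depth are computed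
--     in a single fused pass over a course's prerequisite list."""
--     dependents = {}
--     for code in all_codes:
--         for p in dict.fromkeys(prereqs.get(code, [])):
--             dependents.setdefault(p, []).append(code)
--
--     queue = [c for c in all_codes if not prereqs.get(c, [])]
--     depths = {c: 0 for c in queue}
--
--     i = 0
--     while i < len(queue):
--         current = queue[i]
--         i += 1
--         for code in dependents.get(current, []):
--             if code in depths:
--                 continue
--             d = _depth_if_ready(prereqs.get(code, []), depths)
--             if d is not None:
--                 depths[code] = d
--                 queue.append(code)
--
--     for code in all_codes:
--         if code not in depths:
--             depths[code] = 0
--     return depths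
-- ===== Notes on version B (the rewrite author's own statement) =====
-- stated objective: faster
-- what changed: B builds a reverse-adjacency index once and walks an index-based worklist so each processed course visits only its actual dependents (instead of rescanning all courses per pop), and it fuses A's two passes over a course's prerequisites (the all()-check and the max()) into one early-exit pass returning an optional depth.
import Mathlib
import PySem

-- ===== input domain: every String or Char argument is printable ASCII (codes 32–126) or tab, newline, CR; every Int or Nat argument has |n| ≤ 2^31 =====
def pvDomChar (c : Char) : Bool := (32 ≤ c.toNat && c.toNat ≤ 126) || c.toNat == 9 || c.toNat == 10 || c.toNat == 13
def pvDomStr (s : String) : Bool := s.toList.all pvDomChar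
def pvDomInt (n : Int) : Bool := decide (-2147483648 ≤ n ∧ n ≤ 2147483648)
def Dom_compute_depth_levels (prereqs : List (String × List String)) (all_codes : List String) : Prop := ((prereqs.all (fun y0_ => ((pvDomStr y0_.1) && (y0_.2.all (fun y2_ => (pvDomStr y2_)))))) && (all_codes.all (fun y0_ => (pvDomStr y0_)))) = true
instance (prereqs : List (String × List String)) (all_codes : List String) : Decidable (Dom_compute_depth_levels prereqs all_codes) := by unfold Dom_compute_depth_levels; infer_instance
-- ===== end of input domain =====

-- B replaces A's per-pop rescan of every course by a reverse-adjacency index walked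
-- as an indexed worklist, fusing A's readiness check and max into one pass (objective: faster).

-- max(...) over a generator; A only calls it on a provably nonempty list
-- (the scanned course has the popped prerequisite in its list), so the [] branch is unreachable
def pyListMax : List Int → Int
  | [] => 0
  | h :: t => t.foldl max h

-- ===== PORT A =====
-- A's initial scan: courses with no prerequisites get depth 0 and are queued
def aInit (pr : PySem.Dict String (List String)) (all_codes : List String) :
    PySem.Dict String Int × List String :=
  all_codes.foldl
    (fun st code =>
      if (pr.getD code []).isEmpty then (st.1.insert code 0, st.2 ++ [code]) else st)
    (PySem.Dict.empty, [])

-- body of A's inner 'for code in all_codes' scan after popping 'current'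
-- (A also reads depths[current] into current_depth but never uses it; that read
-- always succeeds since every queued code is already in depths)
def aBody (pr : PySem.Dict String (List String)) (current : String)
    (st : PySem.Dict String Int × List String) (code : String) :
    PySem.Dict String Int × List String :=
  if st.1.contains code then st
  else
    let cp := pr.getD code []
    if current ∈ cp then
      if cp.all (fun p => st.1.contains p) then
        (st.1.insert code (pyListMax (cp.map (fun p => st.1.getD p 0)) + 1), st.2 ++ [code])
      else st
    else st

-- A's 'while queue' BFS; fuel 2*|all_codes| bounds the number of pops (every queue
-- append either comes from the initial scan or assigns a not-yet-assigned code)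
def aLoop (pr : PySem.Dict String (List String)) (all_codes : List String) :
    Nat → PySem.Dict String Int → List String → PySem.Dict String Int
  | 0, d, _ => d
  | _ + 1, d, [] => d
  | fuel + 1, d, current :: q =>
    let st := all_codes.foldl (aBody pr current) (d, [])
    aLoop pr all_codes fuel st.1 (q ++ st.2)

def compute_depth_levels (prereqs : List (String × List String)) (all_codes : List String) :
    List (String × Int) :=
  let pr := PySem.Dict.mk prereqs
  let init := aInit pr all_codes
  let d := aLoop pr all_codes (2 * all_codes.length) init.1 init.2
  (all_codes.foldl (fun d code => if d.contains code then d else d.insert code 0) d).items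

-- ===== PORT B =====
-- B's reverse-adjacency pass: each course is filed, once per distinct prerequisite,
-- in that prerequisite's dependents bucket
-- (dict.fromkeys(cp) = PySem.List.dedup; setdefault(p, []).append(code) = modify p [] (· ++ [code]))
def bDeps (pr : PySem.Dict String (List String)) (all_codes : List String) :
    PySem.Dict String (List String) :=
  all_codes.foldl
    (fun dep code =>
      (PySem.List.dedup (pr.getD code [])).foldl
        (fun dep p => dep.modify p [] (· ++ [code])) dep)
    PySem.Dict.empty

-- _depth_if_ready: one fused pass over the prerequisites, None if one has no depth yet
def depthIfReady (depths : PySem.Dict String Int) : List String → Int → Option Int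
  | [], m => some (m + 1)
  | p :: ps, m =>
    match depths.get? p with
    | none => none
    | some dp => depthIfReady depths ps (if dp > m then dp else m)

-- B's inner 'for code in dependents.get(current, [])' loop
def bScan (pr : PySem.Dict String (List String)) :
    List String → PySem.Dict String Int × List String → PySem.Dict String Int × List String
  | [], st => st
  | code :: rest, st =>
    if st.1.contains code then bScan pr rest st
    else
      match depthIfReady st.1 (pr.getD code []) (-1) with
      | none => bScan pr rest st
      | some v => bScan pr rest (st.1.insert code v, st.2 ++ [code])

-- B's 'while i < len(queue)' walk: the unread tail of the queue is the list argument;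
-- appends land behind it; same fuel bound as A's loop
def bLoop (pr dep : PySem.Dict String (List String)) :
    Nat → PySem.Dict String Int → List String → PySem.Dict String Int
  | 0, d, _ => d
  | _ + 1, d, [] => d
  | fuel + 1, d, current :: rest =>
    let st := bScan pr (dep.getD current []) (d, [])
    bLoop pr dep fuel st.1 (rest ++ st.2)

def compute_depth_levels_alt (prereqs : List (String × List String)) (all_codes : List String) :
    List (String × Int) :=
  let pr := PySem.Dict.mk prereqs
  let dep := bDeps pr all_codes
  let queue0 := all_codes.filter (fun c => (pr.getD c []).isEmpty)
  let d0 := queue0.foldl (fun d c => d.insert c 0) PySem.Dict.empty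
  let d := bLoop pr dep (2 * all_codes.length) d0 queue0
  (all_codes.foldl (fun d code => if d.contains code then d else d.insert code 0) d).items

-- ===== PRECONDITION & SPEC =====
def Spec_compute_depth_levels (prereqs : List (String × List String)) (all_codes : List String) (out : List (String × Int)) : Prop := out = compute_depth_levels_alt prereqs all_codes
instance (prereqs : List (String × List String)) (all_codes : List String) (out : List (String × Int)) : Decidable (Spec_compute_depth_levels prereqs all_codes out) := by unfold Spec_compute_depth_levels; infer_instance

-- ===== CLAIM (what is proved, stated in full; the proofs are below) =====
def Claim_equal_compute_depth_levels : Prop := ∀ (prereqs : List (String × List String)) (all_codes : List String), Dom_compute_depth_levels prereqs all_codes → Spec_compute_depth_levels prereqs all_codes (compute_depth_levels prereqs all_codes)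

-- ===== LEMMAS AND PROOFS =====

-- every depth ever stored is nonnegative (so B's -1 seed is absorbed by the first prereq depth)
def DepthsInv (d : PySem.Dict String Int) : Prop := ∀ p v, d.get? p = some v → 0 ≤ v

-- A's scan body with the 'current ∈ cp' test factored out (proof helper only)
def aCore (pr : PySem.Dict String (List String))
    (st : PySem.Dict String Int × List String) (code : String) :
    PySem.Dict String Int × List String :=
  if st.1.contains code then st
  else
    if (pr.getD code []).all (fun p => st.1.contains p) then
      (st.1.insert code (pyListMax ((pr.getD code []).map (fun p => st.1.getD p 0)) + 1),
       st.2 ++ [code])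
    else st

theorem body_eq_core (pr : PySem.Dict String (List String)) (current : String)
    (st : PySem.Dict String Int × List String) (code : String) :
    aBody pr current st code
      = if current ∈ pr.getD code [] then aCore pr st code else st := by
  unfold aBody aCore
  by_cases hmem : current ∈ pr.getD code [] <;>
    by_cases hc : st.1.contains code <;>
      simp [hmem, hc]

-- appending a code under each of a Nodup list of keys: what one key's bucket ends up as
theorem getD_foldl_modify_append_code (ps : List String) (hps : ps.Nodup)
    (d : PySem.Dict String (List String)) (x code : String) :
    (ps.foldl (fun dep p => dep.modify p [] (· ++ [code])) d).getD x []
      = d.getD x [] ++ (if x ∈ ps then [code] else []) := by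
  induction ps generalizing d with
  | nil => simp
  | cons p ps ih =>
    simp only [List.nodup_cons] at hps
    rw [List.foldl_cons, ih hps.2]
    by_cases hxp : x = p
    · subst hxp
      simp [hps.1]
    · simp [PySem.Dict.getD_modify, hxp]

-- B's dependents dict indexes, per prerequisite, exactly A's inner membership filter
theorem dep_spec_fold (pr : PySem.Dict String (List String)) (all_codes : List String)
    (dep : PySem.Dict String (List String)) (x : String) :
    (all_codes.foldl
      (fun dep code =>
        (PySem.List.dedup (pr.getD code [])).foldl
          (fun dep p => dep.modify p [] (· ++ [code])) dep)
      dep).getD x []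
      = dep.getD x [] ++ all_codes.filter (fun c => x ∈ pr.getD c []) := by
  induction all_codes generalizing dep with
  | nil => simp
  | cons c cs ih =>
    rw [List.foldl_cons, ih,
        getD_foldl_modify_append_code _ (PySem.List.nodup_dedup _) _ x c]
    by_cases hx : x ∈ pr.getD c []
    · simp [hx]
    · simp [hx]

theorem dep_spec (pr : PySem.Dict String (List String)) (all_codes : List String) (x : String) :
    (bDeps pr all_codes).getD x []
      = all_codes.filter (fun c => x ∈ pr.getD c []) := by
  unfold bDeps
  rw [dep_spec_fold]
  simp

-- A's init fold computes B's (root-filter dict, root-filter queue)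
theorem init_eq_fold (pr : PySem.Dict String (List String)) (all_codes : List String)
    (d : PySem.Dict String Int) (q : List String) :
    all_codes.foldl
      (fun st code =>
        if (pr.getD code []).isEmpty then (st.1.insert code 0, st.2 ++ [code]) else st)
      (d, q)
    = ((all_codes.filter (fun c => (pr.getD c []).isEmpty)).foldl
         (fun d c => d.insert c 0) d,
       q ++ all_codes.filter (fun c => (pr.getD c []).isEmpty)) := by
  induction all_codes generalizing d q with
  | nil => simp
  | cons c cs ih =>
    rw [List.foldl_cons, List.filter_cons]
    by_cases hc : (pr.getD c []).isEmpty
    · rw [if_pos hc, ih]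
      simp [hc]
    · rw [if_neg hc, ih]
      simp [hc]

-- fused readiness pass = A's all()-check, then fold of max over the prereq depths
theorem depthIfReady_spec (d : PySem.Dict String Int) (cp : List String) (m : Int) :
    depthIfReady d cp m
      = if cp.all (fun p => d.contains p) then
          some ((cp.map (fun p => d.getD p 0)).foldl
                  (fun a b => if b > a then b else a) m + 1)
        else none := by
  induction cp generalizing m with
  | nil => simp [depthIfReady]
  | cons p ps ih =>
    unfold depthIfReady
    cases hp : d.get? p with
    | none =>
      have hc : d.contains p = false := by
        rw [PySem.Dict.contains_eq_isSome_get?, hp]; rfl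
      simp [hc]
    | some dp =>
      have hc : d.contains p = true := by
        rw [PySem.Dict.contains_eq_isSome_get?, hp]; rfl
      have hgd : d.getD p 0 = dp := PySem.Dict.getD_of_get?_eq_some _ 0 hp
      simp [hc, ih, hgd]

theorem le_foldl_max (t : List Int) (h : Int) : h ≤ t.foldl max h := by
  induction t generalizing h with
  | nil => exact le_refl h
  | cons a t ih => exact le_trans (le_max_left h a) (ih (max h a))

theorem inv_insert (d : PySem.Dict String Int) (k : String) (v : Int)
    (hd : DepthsInv d) (hv : 0 ≤ v) : DepthsInv (d.insert k v) := by
  intro p w hw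
  rw [PySem.Dict.get?_insert] at hw
  by_cases hpk : p = k
  · rw [if_pos hpk] at hw
    cases hw; exact hv
  · rw [if_neg hpk] at hw
    exact hd p w hw

-- the value A inserts is nonnegative (its prereq depths are stored values or cp = [])
theorem core_val_nonneg (d : PySem.Dict String Int) (cp : List String)
    (hd : DepthsInv d) (hall : cp.all (fun p => d.contains p) = true) :
    0 ≤ pyListMax (cp.map (fun p => d.getD p 0)) + 1 := by
  cases cp with
  | nil => simp [pyListMax]
  | cons p ps =>
    simp only [List.all_cons, Bool.and_eq_true] at hall
    have hp : 0 ≤ d.getD p 0 := by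
      rcases hv : d.get? p with _ | v
      · rw [PySem.Dict.contains_eq_isSome_get?, hv] at hall
        exact absurd hall.1 (by simp)
      · rw [PySem.Dict.getD_of_get?_eq_some _ 0 hv]
        exact hd p v hv
    have := le_foldl_max ((ps.map (fun p => d.getD p 0))) (d.getD p 0)
    simp only [pyListMax, List.map_cons]
    omega

theorem inv_core (pr : PySem.Dict String (List String))
    (st : PySem.Dict String Int × List String) (code : String)
    (hd : DepthsInv st.1) : DepthsInv (aCore pr st code).1 := by
  unfold aCore
  split_ifs with h1 h2
  · exact hd
  · exact inv_insert _ _ _ hd (core_val_nonneg _ _ hd h2)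
  · exact hd

-- one step: A's core body = B's fused-pass step, given the nonnegativity invariant
theorem core_eq_bstep (pr : PySem.Dict String (List String))
    (st : PySem.Dict String Int × List String) (code : String)
    (hd : DepthsInv st.1) (hcp : pr.getD code [] ≠ []) :
    aCore pr st code
      = if st.1.contains code then st
        else
          match depthIfReady st.1 (pr.getD code []) (-1) with
          | none => st
          | some v => (st.1.insert code v, st.2 ++ [code]) := by
  unfold aCore
  rw [depthIfReady_spec]
  by_cases h1 : st.1.contains code
  · simp [h1]
  · rw [if_neg h1, if_neg h1]
    by_cases h2 : (pr.getD code []).all (fun p => st.1.contains p)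
    · rw [if_pos h2, if_pos h2]
      rcases hc : pr.getD code [] with _ | ⟨p, ps⟩
      · exact absurd hc hcp
      · rw [hc] at h2
        simp only [List.all_cons, Bool.and_eq_true] at h2
        have hp : 0 ≤ st.1.getD p 0 := by
          rcases hv : st.1.get? p with _ | v
          · rw [PySem.Dict.contains_eq_isSome_get?, hv] at h2
            exact absurd h2.1 (by simp)
          · rw [PySem.Dict.getD_of_get?_eq_some _ 0 hv]
            exact hd p v hv
        have hseed : max (-1 : Int) (st.1.getD p 0) = st.1.getD p 0 :=
          max_eq_right (by omega)
        have hfold : ∀ (t : List Int) (h : Int),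
            t.foldl (fun a b => if b > a then b else a) h = t.foldl max h := by
          intro t
          induction t with
          | nil => intro h; rfl
          | cons a t iht =>
            intro h
            simp only [List.foldl_cons, iht]
            congr 1
            rw [max_def]
            split_ifs <;> omega
        simp only [List.map_cons, List.foldl_cons, pyListMax, hfold, hseed]
    · rw [if_neg h2, if_neg h2]

-- B's scan over any bucket of courses with nonempty prereq lists = A's core fold
theorem scan_eq_core_fold (pr : PySem.Dict String (List String)) (l : List String)
    (st : PySem.Dict String Int × List String) (hd : DepthsInv st.1)
    (hl : ∀ code ∈ l, pr.getD code [] ≠ []) :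
    bScan pr l st = l.foldl (aCore pr) st := by
  induction l generalizing st with
  | nil => rfl
  | cons code rest ih =>
    have hcode := hl code (List.mem_cons_self)
    have hrest : ∀ c ∈ rest, pr.getD c [] ≠ [] := fun c hc => hl c (List.mem_cons_of_mem code hc)
    have hstep := core_eq_bstep pr st code hd hcode
    rw [List.foldl_cons, hstep]
    by_cases h1 : st.1.contains code
    · simp only [bScan, h1]
      exact ih st hd hrest
    · rcases hr : depthIfReady st.1 (pr.getD code []) (-1) with _ | v
      · simp only [bScan, h1, hr]
        exact ih st hd hrest
      · have hinv : DepthsInv ((st.1.insert code v, st.2 ++ [code]) :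
            PySem.Dict String Int × List String).1 := by
          have h2 := inv_core pr st code hd
          rw [hstep, if_neg h1, hr] at h2
          exact h2
        simp only [bScan, h1, hr]
        exact ih _ hinv hrest

theorem inv_core_fold (pr : PySem.Dict String (List String)) (l : List String)
    (st : PySem.Dict String Int × List String) (hd : DepthsInv st.1) :
    DepthsInv (l.foldl (aCore pr) st).1 := by
  induction l generalizing st with
  | nil => exact hd
  | cons code rest ih => exact ih _ (inv_core pr st code hd)

-- the two worklist loops agree step by step
theorem loop_eq (pr : PySem.Dict String (List String)) (all_codes : List String)
    (dep : PySem.Dict String (List String))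
    (hdep : ∀ x, dep.getD x [] = all_codes.filter (fun c => x ∈ pr.getD c []))
    (fuel : Nat) (d : PySem.Dict String Int) (q : List String) (hd : DepthsInv d) :
    aLoop pr all_codes fuel d q = bLoop pr dep fuel d q := by
  induction fuel generalizing d q with
  | zero => rfl
  | succ fuel ih =>
    cases q with
    | nil => rfl
    | cons current q =>
      unfold aLoop bLoop
      have hA : all_codes.foldl (aBody pr current) (d, [])
          = (all_codes.filter (fun c => current ∈ pr.getD c [])).foldl (aCore pr) (d, []) := by
        rw [PySem.List.foldl_congr_mem all_codes (aBody pr current)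
              (fun st code => if current ∈ pr.getD code [] then aCore pr st code else st) (d, [])
              (fun acc x _ => body_eq_core pr current acc x),
            PySem.List.foldl_ite_eq_foldl_filter]
      have hB : bScan pr (dep.getD current []) (d, [])
          = (all_codes.filter (fun c => current ∈ pr.getD c [])).foldl (aCore pr) (d, []) := by
        rw [hdep current]
        refine scan_eq_core_fold pr _ _ hd ?_
        intro code hcode
        rcases List.mem_filter.mp hcode with ⟨-, hmem⟩
        intro hnil
        rw [hnil] at hmem
        simp at hmem
      rw [hA, hB]
      exact ih _ _ (inv_core_fold pr _ _ hd)

theorem inv_insert0_fold (l : List String) (d : PySem.Dict String Int) (hd : DepthsInv d) :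
    DepthsInv (l.foldl (fun d c => d.insert c 0) d) := by
  induction l generalizing d with
  | nil => exact hd
  | cons c cs ih => exact ih _ (inv_insert d c 0 hd (le_refl 0))

theorem inv_empty : DepthsInv (PySem.Dict.empty : PySem.Dict String Int) := by
  intro p v hv
  rw [PySem.Dict.get?_empty] at hv
  cases hv

-- ===== VERDICT (by name: the statement is the Claim_ definition above) =====
theorem compute_depth_levels_spec : Claim_equal_compute_depth_levels := by
  intro prereqs all_codes _
  unfold Spec_compute_depth_levels
  simp only [compute_depth_levels, compute_depth_levels_alt, aInit]
  rw [init_eq_fold]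
  rw [loop_eq (PySem.Dict.mk prereqs) all_codes _
        (dep_spec (PySem.Dict.mk prereqs) all_codes) _ _ _
        (inv_insert0_fold _ _ inv_empty)]
  simp
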